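-- pv_equiv track=rewrite | github.com/Shaikh-UC-DAVIS/note-agent-ML | ml/tasks.py | _window_ranges
-- ===== SOURCE A (Python) =====
-- from typing import Dict, List, Optional, Tuple, Union
--
-- def _window_ranges(n_tokens: int, window_size: int, overlap: int) -> List[Tuple[int, int]]:
--     if window_size <= 0:
--         raise ValueError("window_size must be > 0")
--     if overlap < 0:
--         raise ValueError("overlap must be >= 0")
--     if overlap >= window_size:
--         raise ValueError("overlap must be < window_size")
--
--     ranges: List[Tuple[int, int]] = []
--     step = window_size - overlap
--     start = 0
--     while start < n_tokens:
--         end = min(start + window_size, n_tokens)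
--         ranges.append((start, end))
--         if end == n_tokens:
--             break
--         start += step
--     return ranges
-- ===== SOURCE B (Python) =====
-- from typing import List, Tuple
--
-- def _window_ranges(n_tokens: int, window_size: int, overlap: int) -> List[Tuple[int, int]]:
--     if window_size <= 0:
--         raise ValueError("window_size must be > 0")
--     if overlap < 0:
--         raise ValueError("overlap must be >= 0")
--     if overlap >= window_size:
--         raise ValueError("overlap must be < window_size")
--
--     if n_tokens <= 0:
--         return []
--     if n_tokens <= window_size:
--         return [(0, n_tokens)]
--     step = window_size - overlap
--     num = (n_tokens - window_size + step - 1) // step + 1  # ceil((n-ws)/step) + 1 windows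
--     return [(i * step, min(i * step + window_size, n_tokens)) for i in range(num)]
-- ===== Notes on version B (the rewrite author's own statement) =====
-- stated objective: alternative
-- what changed: Replaces the while/append/break loop with a closed-form window count (ceiling division) followed by a single comprehension generating each (start,end) directly from its index.
import Mathlib
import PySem

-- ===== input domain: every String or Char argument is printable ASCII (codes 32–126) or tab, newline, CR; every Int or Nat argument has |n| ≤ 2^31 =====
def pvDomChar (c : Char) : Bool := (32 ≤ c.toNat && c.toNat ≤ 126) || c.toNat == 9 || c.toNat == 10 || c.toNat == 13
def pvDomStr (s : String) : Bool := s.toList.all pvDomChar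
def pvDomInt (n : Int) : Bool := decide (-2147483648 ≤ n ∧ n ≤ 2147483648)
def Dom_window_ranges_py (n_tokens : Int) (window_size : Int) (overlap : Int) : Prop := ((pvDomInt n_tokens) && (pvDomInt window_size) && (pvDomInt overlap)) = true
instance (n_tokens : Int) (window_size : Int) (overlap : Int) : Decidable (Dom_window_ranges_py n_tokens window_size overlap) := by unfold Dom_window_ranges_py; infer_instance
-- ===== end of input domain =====

-- B replaces A's while/append/break loop by a closed-form window count plus one comprehension
-- (objective: alternative decomposition; same asymptotic cost).

-- ===== PORT A =====
-- A's while loop; fuel bounds the iterations (under Pre_ the loop runs at most n_tokens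
-- iterations, so the fuel never runs out; it only makes the recursion total).
def windowLoopA (n ws step : Int) : Nat → Int → List (Int × Int) → List (Int × Int)
  | 0, _, acc => acc
  | fuel+1, start, acc =>
    if start < n then
      let e := min (start + ws) n
      if e = n then acc ++ [(start, e)]
      else windowLoopA n ws step fuel (start + step) (acc ++ [(start, e)])
    else acc

def window_ranges_py (n_tokens : Int) (window_size : Int) (overlap : Int) : List (Int × Int) :=
  if window_size ≤ 0 then []          -- raise ValueError: excluded by Pre_
  else if overlap < 0 then []         -- raise ValueError: excluded by Pre_
  else if window_size ≤ overlap then []  -- raise ValueError: excluded by Pre_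
  else windowLoopA n_tokens window_size (window_size - overlap) (n_tokens.toNat + 1) 0 []

-- ===== PORT B =====
def window_ranges_py_alt (n_tokens : Int) (window_size : Int) (overlap : Int) : List (Int × Int) :=
  if window_size ≤ 0 then []
  else if overlap < 0 then []
  else if window_size ≤ overlap then []
  else if n_tokens ≤ 0 then []
  else if n_tokens ≤ window_size then [(0, n_tokens)]
  else
    let step := window_size - overlap
    let num := PySem.Int.floordiv (n_tokens - window_size + step - 1) step + 1
    (PySem.List.pyRange 0 num 1).map
      (fun i => (i * step, min (i * step + window_size) n_tokens))

-- ===== PRECONDITION & SPEC =====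
-- Pre_ excludes exactly the inputs on which A raises ValueError (its three explicit guards).
def Pre_window_ranges_py (n_tokens : Int) (window_size : Int) (overlap : Int) : Prop :=
  0 < window_size ∧ 0 ≤ overlap ∧ overlap < window_size
instance (n_tokens : Int) (window_size : Int) (overlap : Int) : Decidable (Pre_window_ranges_py n_tokens window_size overlap) := by unfold Pre_window_ranges_py; infer_instance

def pvWitness_window_ranges_py : Int × Int × Int := (10, 4, 1)

def Spec_window_ranges_py (n_tokens : Int) (window_size : Int) (overlap : Int) (out : List (Int × Int)) : Prop := out = window_ranges_py_alt n_tokens window_size overlap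
instance (n_tokens : Int) (window_size : Int) (overlap : Int) (out : List (Int × Int)) : Decidable (Spec_window_ranges_py n_tokens window_size overlap out) := by unfold Spec_window_ranges_py; infer_instance

-- ===== CLAIM (what is proved, stated in full; the proofs are below) =====
def Claim_equal_window_ranges_py : Prop := ∀ (n_tokens : Int) (window_size : Int) (overlap : Int), Dom_window_ranges_py n_tokens window_size overlap → Pre_window_ranges_py n_tokens window_size overlap → Spec_window_ranges_py n_tokens window_size overlap (window_ranges_py n_tokens window_size overlap)

-- ===== LEMMAS AND PROOFS =====

-- number of windows the loop still emits when it stands at `start < n`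
def wcnt (n ws step start : Int) : Nat :=
  if n ≤ start + ws then 1
  else (PySem.Int.floordiv (n - start - ws + step - 1) step).toNat + 1

lemma wcnt_step (n ws step start : Int) (hs : 1 ≤ step) (h : start + ws < n) :
    wcnt n ws step start = wcnt n ws step (start + step) + 1 := by
  have hstep : (0:Int) < step := by omega
  have hm : (0:Int) < n - start - ws := by omega
  unfold wcnt
  rw [if_neg (by omega)]
  by_cases hc : n ≤ start + step + ws
  · rw [if_pos hc]
    have : PySem.Int.floordiv (n - start - ws + step - 1) step = 1 := by
      rw [PySem.Int.floordiv_eq_iff_of_pos hstep]; constructor <;> nlinarith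
    rw [this]; rfl
  · rw [if_neg hc]
    have h1 : PySem.Int.floordiv (n - start - ws + step - 1) step
        = PySem.Int.floordiv (n - (start + step) - ws + step - 1) step + 1 := by
      rw [PySem.Int.floordiv_eq_ediv_of_pos hstep, PySem.Int.floordiv_eq_ediv_of_pos hstep]
      have : n - start - ws + step - 1 = (n - (start + step) - ws + step - 1) + 1 * step := by ring
      rw [this, Int.add_mul_ediv_right _ _ (by omega)]
    have h2 : (0:Int) ≤ PySem.Int.floordiv (n - (start + step) - ws + step - 1) step := by
      rw [PySem.Int.floordiv_eq_ediv_of_pos hstep]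
      exact Int.ediv_nonneg (by omega) (by omega)
    omega

lemma loop_eq (n ws step : Int) (hs : 1 ≤ step) (hws : step ≤ ws) :
    ∀ (fuel : Nat) (start : Int) (acc : List (Int × Int)), start < n → (n - start).toNat ≤ fuel →
    windowLoopA n ws step fuel start acc =
      acc ++ (List.range (wcnt n ws step start)).map
        (fun (i : Nat) => (start + (i : Int) * step, min (start + (i : Int) * step + ws) n)) := by
  intro fuel
  induction fuel with
  | zero => intro start acc h hf; omega
  | succ fuel ih =>
    intro start acc h hf
    unfold windowLoopA
    rw [if_pos h]
    by_cases he : min (start + ws) n = n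
    · rw [if_pos he]
      have hle : n ≤ start + ws := by omega
      have hw1 : wcnt n ws step start = 1 := by unfold wcnt; rw [if_pos hle]
      rw [hw1]
      simp only [List.range_one, List.map_cons, List.map_nil, Nat.cast_zero, zero_mul, add_zero]
    · rw [if_neg he]
      have hlt : start + ws < n := by omega
      have hmin : min (start + ws) n = start + ws := by omega
      rw [ih (start + step) _ (by omega) (by omega)]
      rw [wcnt_step n ws step start hs hlt, List.range_succ_eq_map]
      simp only [List.map_cons, List.map_map, List.append_assoc, List.cons_append,
        List.nil_append, hmin, Nat.cast_zero, zero_mul, add_zero]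
      congr 1
      congr 1
      refine List.map_congr_left ?_
      intro i _
      simp only [Function.comp_apply, Nat.succ_eq_add_one]
      push_cast
      ring_nf

theorem window_ranges_py_spec_aux (n ws ov : Int) (h : Pre_window_ranges_py n ws ov) :
    window_ranges_py n ws ov = window_ranges_py_alt n ws ov := by
  obtain ⟨h1, h2, h3⟩ := h
  unfold window_ranges_py window_ranges_py_alt
  rw [if_neg (by omega), if_neg (by omega), if_neg (by omega),
      if_neg (by omega), if_neg (by omega), if_neg (by omega)]
  set step := ws - ov with hstepdef
  have hs : 1 ≤ step := by omega
  have hws : step ≤ ws := by omega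
  by_cases hn0 : n ≤ 0
  · rw [if_pos hn0]
    unfold windowLoopA
    rw [if_neg (by omega)]
  · rw [if_neg hn0]
    by_cases hnw : n ≤ ws
    · rw [if_pos hnw]
      rw [loop_eq n ws step hs hws _ 0 [] (by omega) (by omega)]
      have : wcnt n ws step 0 = 1 := by unfold wcnt; rw [if_pos (by omega)]
      rw [this]
      simp only [List.range_one, List.map_cons, List.map_nil, List.nil_append, Nat.cast_zero,
        zero_mul, zero_add, List.cons.injEq, Prod.mk.injEq, and_true]
      exact ⟨trivial, by omega⟩
    · rw [if_neg hnw]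
      rw [loop_eq n ws step hs hws _ 0 [] (by omega) (by omega)]
      have hstep : (0:Int) < step := by omega
      have hd0 : (0:Int) ≤ PySem.Int.floordiv (n - ws + step - 1) step := by
        rw [PySem.Int.floordiv_eq_ediv_of_pos hstep]
        exact Int.ediv_nonneg (by omega) (by omega)
      have hc : wcnt n ws step 0
          = (PySem.Int.floordiv (n - ws + step - 1) step + 1).toNat := by
        unfold wcnt
        rw [if_neg (by omega)]
        have : n - 0 - ws + step - 1 = n - ws + step - 1 := by ring
        rw [this]; omega
      rw [hc]
      simp only [PySem.List.pyRange_one, List.nil_append, List.map_map, sub_zero]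
      refine List.map_congr_left ?_
      intro i _
      simp only [Function.comp_apply]
      push_cast
      ring_nf

-- ===== VERDICT (by name: the statement is the Claim_ definition above) =====
theorem window_ranges_py_spec : Claim_equal_window_ranges_py := by
  intro n ws ov _ hpre
  exact window_ranges_py_spec_aux n ws ov hpre
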